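-- pv_equiv track=rewrite | github.com/ultronstudio/Axarion | asset_manager/asset_utils.py | validate_asset_name
-- ===== SOURCE A (Python) =====
-- def validate_asset_name(name):
--     """Validate asset name for filesystem compatibility"""
--     # Remove or replace invalid characters
--     invalid_chars = '<>:"/\\|?*'
--     for char in invalid_chars:
--         name = name.replace(char, '_')
--
--     # Remove leading/trailing spaces and dots
--     name = name.strip(' .')
--
--     # Ensure it's not empty
--     if not name:
--         name = "unnamed_asset"
--
--     return name
-- ===== SOURCE B (Python) =====
-- def validate_asset_name(name):
--     """Validate asset name for filesystem compatibility"""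
--     out = []
--     for c in name:
--         out.append('_' if c in '<>:"/\\|?*' else c)
--     # trim leading/trailing spaces and dots with two index pointers
--     i, j = 0, len(out)
--     while i < j and out[i] in ' .':
--         i += 1
--     while i < j and out[j - 1] in ' .':
--         j -= 1
--     core = ''.join(out[i:j])
--     return core if core else "unnamed_asset"
-- ===== Notes on version B (the rewrite author's own statement) =====
-- stated objective: alternative
-- what changed: Replaces nine repeated str.replace scans and the built-in .strip(' .') with one explicit character-by-character pass building the result list plus hand-written two-pointer trimming of leading/trailing spaces and dots.
import Mathlib
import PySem

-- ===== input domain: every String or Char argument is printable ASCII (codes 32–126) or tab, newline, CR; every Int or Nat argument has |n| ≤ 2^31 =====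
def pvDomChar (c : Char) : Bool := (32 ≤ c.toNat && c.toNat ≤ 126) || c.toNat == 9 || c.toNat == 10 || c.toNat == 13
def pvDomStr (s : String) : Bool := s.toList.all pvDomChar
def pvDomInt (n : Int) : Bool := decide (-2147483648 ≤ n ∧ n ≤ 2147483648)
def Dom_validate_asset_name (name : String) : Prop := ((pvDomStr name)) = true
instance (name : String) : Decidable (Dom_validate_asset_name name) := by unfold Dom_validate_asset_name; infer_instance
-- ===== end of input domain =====

-- B replaces A's nine str.replace scans and built-in strip with one explicit recursive
-- pass over the characters plus hand-written front/back trimming; objective: alternative.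

-- ===== PORT A =====
-- A: for char in '<>:"/\|?*': name = name.replace(char, '_'); then strip(' .'); then fallback.
def validate_asset_name (name : String) : String :=
  let invalid_chars : String := "<>:\"/\\|?*"
  let name := invalid_chars.toList.foldl
    (fun n char => PySem.Str.replace n (String.ofList [char]) "_") name
  let name := PySem.Str.stripChars name " ."
  if name = "" then "unnamed_asset" else name

-- ===== PORT B =====
-- B helper: the append loop 'for c in name: out.append(...)', as structural recursion.
def pvSanitizeB : List Char → List Char
  | [] => []
  | c :: t => (if ("<>:\"/\\|?*" : String).toList.contains c then '_' else c) :: pvSanitizeB t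

-- B helper: the first while loop (advance i past leading strippable characters).
def pvSkipFrontB (p : Char → Bool) : List Char → List Char
  | [] => []
  | c :: t => if p c then pvSkipFrontB p t else c :: t

-- B helper: the second while loop (retreat j past trailing strippable characters).
def pvSkipBackB (p : Char → Bool) (l : List Char) : List Char :=
  (pvSkipFrontB p l.reverse).reverse

def validate_asset_name_alt (name : String) : String :=
  let p : Char → Bool := fun c => (" ." : String).toList.contains c
  let core := String.ofList (pvSkipBackB p (pvSkipFrontB p (pvSanitizeB name.toList)))
  if core = "" then "unnamed_asset" else core

-- ===== PRECONDITION & SPEC =====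
def Spec_validate_asset_name (name : String) (out : String) : Prop := out = validate_asset_name_alt name
instance (name : String) (out : String) : Decidable (Spec_validate_asset_name name out) := by unfold Spec_validate_asset_name; infer_instance

-- ===== CLAIM (what is proved, stated in full; the proofs are below) =====
def Claim_equal_validate_asset_name : Prop := ∀ (name : String), Dom_validate_asset_name name → Spec_validate_asset_name name (validate_asset_name name)

-- ===== LEMMAS AND PROOFS =====

-- replacing a single character by a single character is a pointwise map
theorem replace_go_single (a b : Char) (fuel : Nat) (l acc : List Char)
    (h : l.length ≤ fuel) :
    PySem.Chars.replace.go [a] [b] fuel l acc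
      = acc.reverse ++ l.map (fun c => if c = a then b else c) := by
  induction fuel generalizing l acc with
  | zero =>
    cases l with
    | nil => simp [PySem.Chars.replace.go]
    | cons c t => simp at h
  | succ fuel ih =>
    cases l with
    | nil => simp [PySem.Chars.replace.go]
    | cons c t =>
      simp only [List.length_cons, Nat.succ_le_succ_iff] at h
      by_cases hc : c = a
      · subst hc
        rw [show PySem.Chars.replace.go [c] [b] (fuel+1) (c :: t) acc
              = PySem.Chars.replace.go [c] [b] fuel t ([b].reverse ++ acc) by
            simp [PySem.Chars.replace.go, List.isPrefixOf]]
        rw [ih _ _ h]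
        simp
      · rw [show PySem.Chars.replace.go [a] [b] (fuel+1) (c :: t) acc
              = PySem.Chars.replace.go [a] [b] fuel t (c :: acc) by
            simp only [PySem.Chars.replace.go, List.isPrefixOf]
            simp only [Bool.and_true]
            rw [if_neg (by simp [Ne.symm hc])]]
        rw [ih _ _ h]
        simp [hc]

theorem chars_replace_single (a b : Char) (l : List Char) :
    PySem.Chars.replace l [a] [b] = l.map (fun c => if c = a then b else c) := by
  rw [show PySem.Chars.replace l [a] [b]
        = PySem.Chars.replace.go [a] [b] l.length l [] by
      simp [PySem.Chars.replace]]
  simpa using replace_go_single a b l.length l [] le_rfl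

theorem str_replace_single (a b : Char) (s : String) :
    (PySem.Str.replace s (String.ofList [a]) (String.ofList [b])).toList
      = s.toList.map (fun c => if c = a then b else c) := by
  simp [PySem.Str.replace, String.toList_ofList]
  exact chars_replace_single a b s.toList

-- the folded nine replaces compute a single pointwise map over the characters
theorem chain_maps_eq_map (inv : List Char) (l : List Char) :
    inv.foldl (fun s a => s.map (fun c => if c = a then '_' else c)) l
      = l.map (fun c => if inv.contains c then '_' else c) := by
  induction inv generalizing l with
  | nil => simp
  | cons a inv ih =>
    simp only [List.foldl_cons]
    rw [ih, List.map_map]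
    apply List.map_congr_left
    intro c _
    by_cases hc : c = a <;> simp [hc]

theorem fold_str_replaces (inv : List Char) (s : String) :
    (inv.foldl (fun n char => PySem.Str.replace n (String.ofList [char]) "_") s).toList
      = inv.foldl (fun l a => l.map (fun c => if c = a then '_' else c)) s.toList := by
  induction inv generalizing s with
  | nil => rfl
  | cons a inv ih =>
    simp only [List.foldl_cons]
    rw [ih]
    congr 1
    have h1 : ("_" : String) = String.ofList ['_'] := rfl
    rw [h1, str_replace_single]

-- B's recursive pass is that same pointwise map
theorem sanitizeB_eq_map (l : List Char) :
    pvSanitizeB l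
      = l.map (fun c => if ("<>:\"/\\|?*" : String).toList.contains c then '_' else c) := by
  induction l with
  | nil => rfl
  | cons c t ih => simp [pvSanitizeB, ih]

-- B's front-trim loop is dropWhile
theorem skipFrontB_eq_dropWhile (p : Char → Bool) (l : List Char) :
    pvSkipFrontB p l = l.dropWhile p := by
  induction l with
  | nil => rfl
  | cons c t ih =>
    by_cases hc : p c = true <;> simp [pvSkipFrontB, List.dropWhile, hc, ih]

-- B's two trims compute stripChars
theorem skip_eq_stripChars (l : List Char) :
    pvSkipBackB (fun c => (" ." : String).toList.contains c)
        (pvSkipFrontB (fun c => (" ." : String).toList.contains c) l)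
      = PySem.Chars.stripChars l (" ." : String).toList := by
  simp [pvSkipBackB, skipFrontB_eq_dropWhile, PySem.Chars.stripChars]

-- ===== VERDICT (by name: the statement is the Claim_ definition above) =====
theorem validate_asset_name_spec : Claim_equal_validate_asset_name := by
  intro name _
  unfold Spec_validate_asset_name validate_asset_name validate_asset_name_alt
  simp only []
  have key : PySem.Str.stripChars
      (("<>:\"/\\|?*" : String).toList.foldl
        (fun n char => PySem.Str.replace n (String.ofList [char]) "_") name) " ."
      = String.ofList
          (pvSkipBackB (fun c => (" ." : String).toList.contains c)
            (pvSkipFrontB (fun c => (" ." : String).toList.contains c)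
              (pvSanitizeB name.toList))) := by
    apply String.toList_inj.mp
    rw [PySem.Str.toList_stripChars, fold_str_replaces, chain_maps_eq_map,
        skip_eq_stripChars, sanitizeB_eq_map]
    exact String.toList_ofList.symm
  rw [key]
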